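-- pv_equiv track=rewrite | github.com/EMPS-2025/EM_SparkTest | utils/formatters.py | label_slot_ranges
-- ===== SOURCE A (Python) =====
-- from typing import List, Tuple, Optional
--
-- def format_time_hhmm(total_minutes: int) -> str:
--     """Format minutes as HH:MM (24:00 for end of day)."""
--     if total_minutes == 24 * 60:
--         return "24:00"
--     h = (total_minutes // 60) % 24
--     m = total_minutes % 60
--     return f"{h:02d}:{m:02d}"
--
-- def compress_ranges(indices: List[int]) -> List[Tuple[int, int]]:
--     """Compress list of indices into contiguous ranges.
--
--     Example: [1, 2, 3, 5, 6, 8] → [(1, 3), (5, 6), (8, 8)]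
--     """
--     if not indices:
--         return []
--
--     sorted_unique = sorted(set(indices))
--     ranges = []
--     start = prev = sorted_unique[0]
--
--     for current in sorted_unique[1:]:
--         if current == prev + 1:
--             prev = current
--         else:
--             ranges.append((start, prev))
--             start = prev = current
--
--     ranges.append((start, prev))
--     return ranges
--
-- def label_slot_ranges(slots: List[int]) -> Tuple[str, str, int]:
--     """Convert 15-min slot list to time labels and count.
--
--     Returns: (time_label, index_label, total_slots)
--     """
--     ranges = compress_ranges(slots)
--
--     time_parts = [
--         f"{format_time_hhmm((s-1)*15)}–{format_time_hhmm(e*15)}"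
--         for s, e in ranges
--     ]
--
--     idx_parts = [
--         f"{s}–{e}" if s != e else f"{s}"
--         for s, e in ranges
--     ]
--
--     total_count = sum(e - s + 1 for s, e in ranges)
--
--     return " + ".join(time_parts), ", ".join(idx_parts), total_count
-- ===== SOURCE B (Python) =====
-- def format_time_hhmm(total_minutes: int) -> str:
--     """Format minutes as HH:MM (24:00 for end of day)."""
--     if total_minutes == 24 * 60:
--         return "24:00"
--     h = (total_minutes // 60) % 24
--     m = total_minutes % 60
--     return f"{h:02d}:{m:02d}"
--
--
-- def label_slot_ranges(slots):
--     """Boundary detection via set membership (no adjacent-gap scan):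
--     a slot s starts a run iff s-1 is absent from the set, ends one iff
--     s+1 is absent; the sorted start and end boundary lists pair up
--     positionally, and the total is simply the set's size."""
--     S = set(slots)
--     starts = sorted(x for x in S if x - 1 not in S)
--     ends = sorted(x for x in S if x + 1 not in S)
--     pairs = list(zip(starts, ends))
--     time_parts = [f"{format_time_hhmm((s - 1) * 15)}\u2013{format_time_hhmm(e * 15)}" for s, e in pairs]
--     idx_parts = [f"{s}\u2013{e}" if s != e else f"{s}" for s, e in pairs]
--     return " + ".join(time_parts), ", ".join(idx_parts), len(S)
-- ===== Notes on version B (the rewrite author's own statement) =====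
-- stated objective: alternative
-- what changed: Replaces A's sort-then-adjacent-gap scan that builds a ranges table with set-membership boundary detection: a slot starts a run iff slot-1 is not in the set and ends one iff slot+1 is not, the sorted start/end boundary lists are zipped into pairs, and the total is just the set's size.
import Mathlib
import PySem

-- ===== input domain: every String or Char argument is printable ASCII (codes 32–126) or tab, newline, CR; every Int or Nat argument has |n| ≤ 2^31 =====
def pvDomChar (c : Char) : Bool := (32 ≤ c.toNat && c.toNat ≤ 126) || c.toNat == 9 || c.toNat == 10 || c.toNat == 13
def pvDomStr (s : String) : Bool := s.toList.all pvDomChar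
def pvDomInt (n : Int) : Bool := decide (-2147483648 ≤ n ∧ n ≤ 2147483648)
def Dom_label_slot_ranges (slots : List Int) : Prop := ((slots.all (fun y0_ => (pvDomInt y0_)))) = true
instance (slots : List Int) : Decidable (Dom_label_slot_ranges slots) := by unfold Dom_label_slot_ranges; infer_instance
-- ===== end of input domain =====

-- B replaces A's sort-then-adjacent-gap scan by set-membership boundary
-- detection (run starts/ends found by probing the set, zipped positionally);
-- objective: alternative algorithm of similar cost.

-- shared same-module helper format_time_hhmm (both Pythons carry the identical code)
-- pad2 is exact for the reachable 0 ≤ n < 100 (h,m are Python-floor remainders mod 24/60, hence nonnegative)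
def pad2 (n : Int) : String :=
  if n < 10 then "0" ++ PySem.Int.toStr n else PySem.Int.toStr n

def format_time_hhmm (total_minutes : Int) : String :=
  if total_minutes = 24 * 60 then "24:00"
  else
    let h := PySem.Int.mod (PySem.Int.floordiv total_minutes 60) 24
    let m := PySem.Int.mod total_minutes 60
    pad2 h ++ ":" ++ pad2 m

-- the two f-string label expressions (identical in both Pythons)
def timeLabel (s e : Int) : String :=
  format_time_hhmm ((s - 1) * 15) ++ "–" ++ format_time_hhmm (e * 15)

def idxLabel (s e : Int) : String :=
  if s ≠ e then PySem.Int.toStr s ++ "–" ++ PySem.Int.toStr e else PySem.Int.toStr s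

-- ===== PORT A =====
-- the for-loop of compress_ranges with state (ranges, start, prev), fused with the final append
def crLoop (acc : List (Int × Int)) (st pv : Int) : List Int → List (Int × Int)
  | [] => acc ++ [(st, pv)]
  | c :: cs => if c = pv + 1 then crLoop acc st c cs else crLoop (acc ++ [(st, pv)]) c c cs

def compress_ranges (indices : List Int) : List (Int × Int) :=
  if indices = [] then []
  else
    match PySem.List.sorted (PySem.Set.ofList indices) (fun x => x) false with
    | [] => []   -- unreachable: sorted set of a nonempty list is nonempty
    | s :: rest => crLoop [] s s rest

def label_slot_ranges (slots : List Int) : String × String × Int :=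
  let ranges := compress_ranges slots
  let time_parts := ranges.map (fun r => timeLabel r.1 r.2)
  let idx_parts := ranges.map (fun r => idxLabel r.1 r.2)
  let total_count := (ranges.map (fun r => r.2 - r.1 + 1)).sum
  (PySem.Str.join " + " time_parts, PySem.Str.join ", " idx_parts, total_count)

-- ===== PORT B =====
-- Source B: set S; run starts = sorted {x ∈ S | x-1 ∉ S}; run ends = sorted {x ∈ S | x+1 ∉ S};
-- zip them into pairs, format both labels from the pairs, count = |S|.
-- (the generator iterates the set, then sorts with no key: order-independent, exact)
def label_slot_ranges_alt (slots : List Int) : String × String × Int :=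
  let S := PySem.Set.ofList slots
  let starts := PySem.List.sorted (S.filter (fun x => !(PySem.Set.contains S (x - 1)))) (fun x => x) false
  let ends := PySem.List.sorted (S.filter (fun x => !(PySem.Set.contains S (x + 1)))) (fun x => x) false
  let pairs := starts.zip ends
  let time_parts := pairs.map (fun r => timeLabel r.1 r.2)
  let idx_parts := pairs.map (fun r => idxLabel r.1 r.2)
  (PySem.Str.join " + " time_parts, PySem.Str.join ", " idx_parts, (S.length : Int))

-- ===== PRECONDITION & SPEC =====
def Spec_label_slot_ranges (slots : List Int) (out : String × String × Int) : Prop := out = label_slot_ranges_alt slots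
instance (slots : List Int) (out : String × String × Int) : Decidable (Spec_label_slot_ranges slots out) := by unfold Spec_label_slot_ranges; infer_instance

-- ===== CLAIM (what is proved, stated in full; the proofs are below) =====
def Claim_equal_label_slot_ranges : Prop := ∀ (slots : List Int), Dom_label_slot_ranges slots → Spec_label_slot_ranges slots (label_slot_ranges slots)

-- ===== LEMMAS AND PROOFS =====

theorem contains_eq_decide (l : List Int) (z : Int) : PySem.Set.contains l z = decide (z ∈ l) := by
  by_cases h : z ∈ l
  · simp [h, (PySem.Set.contains_iff l z).mpr h]
  · simp only [h, decide_false]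
    cases hc : PySem.Set.contains l z
    · rfl
    · exact absurd ((PySem.Set.contains_iff l z).mp hc) h

-- ---- A-side loop characterisation ----
-- inner grouping: advance through the current consecutive run; returns (run end, rest)
def splitRun (prev : Int) : List Int → Int × List Int
  | [] => (prev, [])
  | x :: xs => if x = prev + 1 then splitRun x xs else (prev, x :: xs)

theorem splitRun_length (xs : List Int) : ∀ prev, ((splitRun prev xs).2).length ≤ xs.length := by
  induction xs with
  | nil => intro prev; simp [splitRun]
  | cons x xs ih =>
      intro prev
      simp only [splitRun]
      split
      · exact Nat.le_succ_of_le (ih x)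
      · simp

-- the maximal consecutive runs of a list, as (start, end) pairs
def runs : List Int → List (Int × Int)
  | [] => []
  | s :: rest =>
      let p := splitRun s rest
      (s, p.1) :: runs p.2
  termination_by l => l.length
  decreasing_by
    simp only [List.length_cons]
    exact Nat.lt_succ_of_le (splitRun_length rest s)

theorem crLoop_eq_runs (rest : List Int) : ∀ st pv acc,
    crLoop acc st pv rest = acc ++ (st, (splitRun pv rest).1) :: runs (splitRun pv rest).2 := by
  induction rest with
  | nil => intro st pv acc; simp [crLoop, splitRun, runs]
  | cons c cs ih =>
      intro st pv acc
      by_cases h : c = pv + 1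
      · subst h
        simp only [crLoop, splitRun, if_true]
        exact ih st (pv + 1) acc
      · simp only [crLoop, splitRun, if_neg h]
        rw [ih c c]
        simp [runs]

theorem sortedSet_ne_nil {slots : List Int} (h : slots ≠ []) :
    PySem.List.sorted (PySem.Set.ofList slots) (fun x => x) false ≠ [] := by
  rw [Ne, PySem.List.sorted_eq_nil_iff]
  match slots, h with
  | x :: xs, _ =>
    intro hc
    have : x ∈ PySem.Set.ofList (x :: xs) := by
      rw [PySem.Set.mem_ofList]; exact List.mem_cons_self
    simp [hc] at this

theorem compress_eq_runs (slots : List Int) :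
    compress_ranges slots = runs (PySem.List.sorted (PySem.Set.ofList slots) (fun x => x) false) := by
  unfold compress_ranges
  by_cases h : slots = []
  · subst h; simp [PySem.Set.ofList, PySem.List.sorted, runs]
  · rw [if_neg h]
    obtain ⟨s, rest, hsu⟩ := List.exists_cons_of_ne_nil (sortedSet_ne_nil h)
    rw [hsu]
    show crLoop [] s s rest = runs (s :: rest)
    rw [crLoop_eq_runs, runs]
    simp

-- ---- contiguous integer segments ----
def seg (a : Int) : Nat → List Int
  | 0 => []
  | k + 1 => a :: seg (a + 1) k

theorem seg_length : ∀ (k : Nat) (a : Int), (seg a k).length = k := by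
  intro k
  induction k with
  | zero => intro a; rfl
  | succ k ih => intro a; simp [seg, ih]

theorem mem_seg : ∀ (k : Nat) (a x : Int), x ∈ seg a k ↔ a ≤ x ∧ x < a + k := by
  intro k
  induction k with
  | zero => intro a x; simp [seg]
  | succ k ih =>
      intro a x
      simp only [seg, List.mem_cons, ih]
      push_cast
      omega

theorem splitRun_decomp : ∀ (rest : List Int) (prev : Int), ∃ (k : Nat) (tl : List Int),
    splitRun prev rest = (prev + (k : Int), tl) ∧ rest = seg (prev + 1) k ++ tl ∧
    (∀ h t, tl = h :: t → h ≠ prev + (k : Int) + 1) := by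
  intro rest
  induction rest with
  | nil =>
      intro prev
      exact ⟨0, [], by simp [splitRun], by simp [seg], by intro h t ht; cases ht⟩
  | cons x xs ih =>
      intro prev
      by_cases hx : x = prev + 1
      · subst hx
        obtain ⟨k, tl, h1, h2, h3⟩ := ih (prev + 1)
        refine ⟨k + 1, tl, ?_, ?_, ?_⟩
        · have hif : splitRun prev ((prev + 1) :: xs) = splitRun (prev + 1) xs := by
            simp [splitRun]
          rw [hif, h1, Prod.mk.injEq]
          exact ⟨by push_cast; ring, rfl⟩
        · rw [h2]
          simp [seg]
        · intro h t ht
          have := h3 h t ht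
          push_cast
          push_cast at this
          omega
      · exact ⟨0, x :: xs, by simp [splitRun, hx], by simp [seg], by
          intro h t ht
          injection ht with hh _
          subst hh
          simpa using hx⟩

-- ---- main characterisation: on a strictly increasing list, A's runs project to exactly
-- the boundary-filtered lists, and the run lengths sum to the list length ----
theorem runs_char : ∀ (n : Nat) (l : List Int), l.length ≤ n → l.Pairwise (· < ·) →
    ((runs l).map Prod.fst = l.filter (fun x => !(PySem.Set.contains l (x - 1))) ∧
     (runs l).map Prod.snd = l.filter (fun x => !(PySem.Set.contains l (x + 1))) ∧
     ((runs l).map (fun r => r.2 - r.1 + 1)).sum = (l.length : Int)) := by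
  intro n
  induction n with
  | zero =>
      intro l hl _
      have : l = [] := List.eq_nil_of_length_eq_zero (Nat.le_zero.mp hl)
      subst this
      simp [runs]
  | succ n ih =>
      intro l hl hp
      match l, hl, hp with
      | [], _, _ => simp [runs]
      | s :: rest, hl, hp =>
          obtain ⟨k, tl, hsp, hrest, hstop⟩ := splitRun_decomp rest s
          have hldec : s :: rest = seg s (k + 1) ++ tl := by
            simp only [seg, List.cons_append]
            rw [hrest]
          rw [hldec] at hp
          rw [List.pairwise_append] at hp
          obtain ⟨hpseg, hptl, hcross⟩ := hp
          have hsegmem : ∀ x, x ∈ seg s (k + 1) ↔ s ≤ x ∧ x ≤ s + (k : Int) := by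
            intro x; rw [mem_seg]; push_cast; omega
          have hend_mem : (s + (k : Int)) ∈ seg s (k + 1) := by
            rw [hsegmem]; omega
          have htl_gt : ∀ y ∈ tl, s + (k : Int) + 1 < y := by
            intro y hy
            match tl, hy, hptl, hstop with
            | h :: t, hy, hptl, hstop =>
              have hne := hstop h t rfl
              have hh : s + (k : Int) < h := hcross _ hend_mem _ List.mem_cons_self
              rcases List.mem_cons.mp hy with rfl | hyt
              · omega
              · have := (List.pairwise_cons.mp hptl).1 y hyt
                omega
          -- membership in l via the decomposition
          have hcontains : ∀ z : Int,
              PySem.Set.contains (s :: rest) z = decide ((s ≤ z ∧ z ≤ s + (k : Int)) ∨ z ∈ tl) := by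
            intro z
            rw [contains_eq_decide, decide_eq_decide, hldec, List.mem_append, hsegmem]
          -- unfold one step of runs
          have hruns : runs (s :: rest) = (s, s + (k : Int)) :: runs tl := by
            rw [runs]
            simp only [hsp]
          have htl_len : tl.length ≤ n := by
            have h1 : rest.length = k + tl.length := by rw [hrest]; simp [seg_length]
            simp only [List.length_cons] at hl
            omega
          obtain ⟨ihf, ihs, ihl⟩ := ih tl htl_len hptl
          have hPred1 : (fun x => !(PySem.Set.contains (s :: rest) (x - 1)))
              = (fun x => !(decide ((s ≤ x - 1 ∧ x - 1 ≤ s + (k : Int)) ∨ (x - 1) ∈ tl))) :=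
            funext fun x => by rw [hcontains]
          have hPred2 : (fun x => !(PySem.Set.contains (s :: rest) (x + 1)))
              = (fun x => !(decide ((s ≤ x + 1 ∧ x + 1 ≤ s + (k : Int)) ∨ (x + 1) ∈ tl))) :=
            funext fun x => by rw [hcontains]
          refine ⟨?_, ?_, ?_⟩
          · -- starts
            rw [hruns, List.map_cons, ihf, hPred1]
            conv_rhs => rw [hldec]
            rw [List.filter_append]
            have hseg1 : (seg s (k + 1)).filter
                (fun x => !(decide ((s ≤ x - 1 ∧ x - 1 ≤ s + (k : Int)) ∨ (x - 1) ∈ tl))) = [s] := by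
              simp only [seg, List.filter_cons]
              have hs : (!(decide ((s ≤ s - 1 ∧ s - 1 ≤ s + (k : Int)) ∨ (s - 1) ∈ tl))) = true := by
                simp only [Bool.not_eq_true', decide_eq_false_iff_not]
                rintro (⟨h1, _⟩ | hy)
                · omega
                · have := htl_gt _ hy; omega
              rw [hs]
              simp only [if_true]
              congr 1
              rw [List.filter_eq_nil_iff]
              intro x hx
              have hxm := (mem_seg _ _ _).mp hx
              push_cast at hxm
              have hd : (s ≤ x - 1 ∧ x - 1 ≤ s + (k : Int)) ∨ (x - 1) ∈ tl := Or.inl (by omega)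
              rw [decide_eq_true hd]
              simp
            rw [hseg1]
            have htlf : tl.filter (fun x => !(decide ((s ≤ x - 1 ∧ x - 1 ≤ s + (k : Int)) ∨ (x - 1) ∈ tl)))
                      = tl.filter (fun x => !(PySem.Set.contains tl (x - 1))) := by
              apply List.filter_congr
              intro x hx
              have hxgt := htl_gt _ hx
              rw [contains_eq_decide]
              congr 1
              rw [decide_eq_decide]
              exact ⟨fun h => h.resolve_left (by omega), Or.inr⟩
            rw [htlf]
            simp
          · -- ends
            rw [hruns, List.map_cons, ihs, hPred2]
            conv_rhs => rw [hldec]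
            rw [List.filter_append]
            have hseg2 : (seg s (k + 1)).filter
                (fun x => !(decide ((s ≤ x + 1 ∧ x + 1 ≤ s + (k : Int)) ∨ (x + 1) ∈ tl))) = [s + (k : Int)] := by
              have hfin : ∀ (j : Nat) (a : Int), a + (j : Int) = s + (k : Int) → s ≤ a →
                  (seg a (j + 1)).filter
                    (fun x => !(decide ((s ≤ x + 1 ∧ x + 1 ≤ s + (k : Int)) ∨ (x + 1) ∈ tl))) = [s + (k : Int)] := by
                intro j
                induction j with
                | zero =>
                    intro a ha _
                    simp only [Nat.cast_zero, add_zero] at ha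
                    simp only [seg, List.filter_cons, List.filter_nil]
                    have hcond : (!(decide ((s ≤ a + 1 ∧ a + 1 ≤ s + (k : Int)) ∨ (a + 1) ∈ tl))) = true := by
                      simp only [Bool.not_eq_true', decide_eq_false_iff_not]
                      rintro (⟨_, h2⟩ | hy)
                      · omega
                      · have := htl_gt _ hy; omega
                    rw [hcond]
                    simp [ha]
                | succ j ihj =>
                    intro a ha hsa
                    push_cast at ha
                    simp only [seg]
                    rw [List.filter_cons_of_neg]
                    · exact ihj (a + 1) (by push_cast; omega) (by omega)
                    · have hd : (s ≤ a + 1 ∧ a + 1 ≤ s + (k : Int)) ∨ (a + 1) ∈ tl := Or.inl (by omega)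
                      rw [decide_eq_true hd]
                      simp
              exact hfin k s rfl (le_refl s)
            rw [hseg2]
            have htlf2 : tl.filter (fun x => !(decide ((s ≤ x + 1 ∧ x + 1 ≤ s + (k : Int)) ∨ (x + 1) ∈ tl)))
                      = tl.filter (fun x => !(PySem.Set.contains tl (x + 1))) := by
              apply List.filter_congr
              intro x hx
              have hxgt := htl_gt _ hx
              rw [contains_eq_decide]
              congr 1
              rw [decide_eq_decide]
              exact ⟨fun h => h.resolve_left (by omega), Or.inr⟩
            rw [htlf2]
            simp
          · -- total
            rw [hruns, List.map_cons, List.sum_cons, ihl]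
            have h1 : rest.length = k + tl.length := by rw [hrest]; simp [seg_length]
            simp only [List.length_cons, h1]
            push_cast
            ring

-- zipping the two projections back together
theorem zip_proj (l : List (Int × Int)) : (l.map Prod.fst).zip (l.map Prod.snd) = l := by
  induction l with
  | nil => rfl
  | cons x xs ih => simp [ih]

-- ===== VERDICT (by name: the statement is the Claim_ definition above) =====
theorem label_slot_ranges_spec : Claim_equal_label_slot_ranges := by
  intro slots _
  unfold Spec_label_slot_ranges label_slot_ranges label_slot_ranges_alt
  rw [compress_eq_runs]
  set S := PySem.Set.ofList slots with hS
  set su := PySem.List.sorted S (fun x => x) false with hsu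
  have hperm : su.Perm S := PySem.List.sorted_perm S (fun x => x) false
  have hpl : su.Pairwise (· < ·) := PySem.List.sorted_ofList_pairwise_lt slots
  obtain ⟨hf, hs2, hl⟩ := runs_char su.length su (Nat.le_refl _) hpl
  have hmemEq : ∀ z : Int, PySem.Set.contains S z = PySem.Set.contains su z := by
    intro z
    rw [contains_eq_decide, contains_eq_decide, decide_eq_decide]
    exact hperm.mem_iff.symm
  have hsortfilt : ∀ p : Int → Bool,
      PySem.List.sorted (S.filter p) (fun x => x) false = su.filter p := by
    intro p
    apply PySem.List.sorted_eq_of_perm_of_pairwise_lt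
    · exact hperm.filter p
    · exact List.Pairwise.filter p hpl
  have hstarts : PySem.List.sorted (S.filter (fun x => !(PySem.Set.contains S (x - 1)))) (fun x => x) false
      = (runs su).map Prod.fst := by
    rw [hsortfilt, hf]
    exact List.filter_congr fun x _ => by rw [hmemEq]
  have hends : PySem.List.sorted (S.filter (fun x => !(PySem.Set.contains S (x + 1)))) (fun x => x) false
      = (runs su).map Prod.snd := by
    rw [hsortfilt, hs2]
    exact List.filter_congr fun x _ => by rw [hmemEq]
  simp only [hstarts, hends, zip_proj, hl, hperm.length_eq]
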